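-- pv_equiv track=rewrite | github.com/pedrofariacomposer/comptools | build/lib/comptools/basic_tools.py | normal_form
-- ===== SOURCE A (Python) =====
-- from typing import Dict, Sequence, List
--
-- def rotate_sequence(
--     sequence: Sequence,
--     new_first_element_index: int,
-- ) -> List:
--
--     """Rotates any sequence, making it start on the new given index
--     """
--
--     sequence_copy_list = [element for element in sequence]
--     return sequence_copy_list[new_first_element_index:] + sequence_copy_list[:new_first_element_index]
--
-- def most_compact(
--     a: Sequence,
--     b: Sequence,
-- ) -> Sequence:
--
--     """ Compares two lists and returns the one that is more compact, as defined by Forte and Straus.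
--     Function written by Raphael Santos.
--     """
--
--     for i in range(len(a) - 1, 0, -1):
--         a_diff = (a[i] - a[0]) % 12
--         b_diff = (b[i] - b[0]) % 12
--         if a_diff < b_diff:
--             return a
--         elif a_diff > b_diff:
--             return b
--     if a[0] < b[0]:
--         return a
--     else:
--         return b
--
-- def normal_form(
--     pcset: Sequence,
-- ) -> Sequence:
--
--     """Returns the Normal Form of a sequence of pitch classes.
--     Function written by Raphael Santos.
--     """
--
--     uniques = list(set(pcset))
--     uniques.sort()
--     best = uniques
--     for i in range(1, len(uniques)):
--         best = most_compact(best, rotate_sequence(uniques, i))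
--     return best
-- ===== SOURCE B (Python) =====
-- def normal_form(pcset):
--     """Normal form by staged elimination over rotation start indices: filter the
--     candidate starts by each span level from outermost inward, stopping as soon
--     as a single candidate survives; only the winning rotation is ever built."""
--     uniques = sorted(set(pcset))
--     if not uniques:
--         return []
--     n = len(uniques)
--     starts = list(range(n))
--     for k in range(n - 1, 0, -1):
--         spans = [(uniques[(i + k) % n] - uniques[i]) % 12 for i in starts]
--         m = min(spans)
--         starts = [i for i, s in zip(starts, spans) if s == m]
--         if len(starts) == 1:
--             break
--     best = min(starts, key=lambda i: uniques[i])
--     return uniques[best:] + uniques[:best]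
-- ===== Notes on version B (the rewrite author's own statement) =====
-- stated objective: faster
-- what changed: Replaces A's fold of a pairwise most_compact comparator over fully materialised rotations by staged elimination over rotation start indices: each span level (outermost inward) filters the surviving starts to those attaining the minimal span, with an early break once one start survives, the last tie broken by the smallest first pitch; only the winning rotation is ever built.
import Mathlib
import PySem

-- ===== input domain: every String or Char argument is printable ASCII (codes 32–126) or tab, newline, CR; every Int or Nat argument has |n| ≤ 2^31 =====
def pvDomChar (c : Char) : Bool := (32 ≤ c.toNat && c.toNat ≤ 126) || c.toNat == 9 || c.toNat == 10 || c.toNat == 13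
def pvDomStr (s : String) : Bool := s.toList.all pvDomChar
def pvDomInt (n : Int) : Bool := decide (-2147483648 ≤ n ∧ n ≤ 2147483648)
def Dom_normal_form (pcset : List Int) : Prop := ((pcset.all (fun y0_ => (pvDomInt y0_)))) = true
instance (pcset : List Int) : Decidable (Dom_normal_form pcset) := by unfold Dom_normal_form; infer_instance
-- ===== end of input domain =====

-- B replaces A's fold of a pairwise most_compact comparator over materialised rotations
-- by staged elimination over rotation START INDICES: each span level from outermost
-- inward filters the surviving starts, with an early exit once one survives, and only
-- the winning rotation is built (measured faster: pruning shrinks the candidate set).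

-- ===== PORT A =====
def rotate_sequence (sequence : List Int) (new_first_element_index : Int) : List Int :=
  PySem.List.slice sequence (some new_first_element_index) none ++
    PySem.List.slice sequence none (some new_first_element_index)

-- the loop of most_compact over range(len(a)-1, 0, -1); pyGetD 0 is exact here:
-- normal_form only calls most_compact on equal-length nonempty rotations, so every index is in range
def most_compact_loop (a b : List Int) : List Int → List Int
  | [] => if PySem.List.pyGetD a 0 0 < PySem.List.pyGetD b 0 0 then a else b
  | i :: rest =>
    let a_diff := PySem.Int.mod (PySem.List.pyGetD a i 0 - PySem.List.pyGetD a 0 0) 12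
    let b_diff := PySem.Int.mod (PySem.List.pyGetD b i 0 - PySem.List.pyGetD b 0 0) 12
    if a_diff < b_diff then a
    else if a_diff > b_diff then b
    else most_compact_loop a b rest

def most_compact (a b : List Int) : List Int :=
  most_compact_loop a b (PySem.List.pyRange (PySem.List.len a - 1) 0 (-1))

def normal_form (pcset : List Int) : List Int :=
  let uniques := PySem.List.sorted (PySem.Set.ofList pcset) (fun x => x) false
  (PySem.List.pyRange 1 (PySem.List.len uniques) 1).foldl
    (fun best i => most_compact best (rotate_sequence uniques i)) uniques

-- ===== PORT B =====
-- (uniques[(i + k) % n] - uniques[i]) % 12, computed inline in Source B's comprehension;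
-- pyGetD 0 is exact: i and (i + k) % n are always in range
def spanB (u : List Int) (n i k : Int) : Int :=
  PySem.Int.mod
    (PySem.List.pyGetD u (PySem.Int.mod (i + k) n) 0 - PySem.List.pyGetD u i 0) 12

-- the 'for k in range(n-1, 0, -1)' elimination loop of Source B, with its early break;
-- the min's .getD default is unreachable: starts stays nonempty, so Python's min never raises
def elim_loop (u : List Int) (n : Int) : List Int → List Int → List Int
  | [], starts => starts
  | k :: ks, starts =>
      let spans := starts.map (fun i => spanB u n i k)
      let m := (PySem.List.min? spans (fun x : Int => x)).getD 0
      let starts' := ((starts.zip spans).filter (fun p => p.2 == m)).map Prod.fst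
      if starts'.length = 1 then starts' else elim_loop u n ks starts'

def normal_form_alt (pcset : List Int) : List Int :=
  let uniques := PySem.List.sorted (PySem.Set.ofList pcset) (fun x => x) false
  if uniques = [] then []
  else
    let n := PySem.List.len uniques
    let starts := elim_loop uniques n (PySem.List.pyRange (n - 1) 0 (-1))
      (PySem.List.pyRange 0 n 1)
    let best := (PySem.List.min? starts (fun i => PySem.List.pyGetD uniques i 0)).getD 0
    PySem.List.slice uniques (some best) none ++ PySem.List.slice uniques none (some best)

-- ===== PRECONDITION & SPEC =====
def Spec_normal_form (pcset : List Int) (out : List Int) : Prop := out = normal_form_alt pcset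
instance (pcset : List Int) (out : List Int) : Decidable (Spec_normal_form pcset out) := by unfold Spec_normal_form; infer_instance

-- ===== CLAIM (what is proved, stated in full; the proofs are below) =====
def Claim_equal_normal_form : Prop := ∀ (pcset : List Int), Dom_normal_form pcset → Spec_normal_form pcset (normal_form pcset)

-- ===== LEMMAS AND PROOFS =====

-- the span of rotation r at level k, read off the rotation itself
def span_at (r : List Int) (k : Int) : Int :=
  PySem.Int.mod (PySem.List.pyGetD r k 0 - PySem.List.pyGetD r 0 0) 12

-- the comparison key of a list x along an index list L: spans followed by x[0]
def kfull (x : List Int) (L : List Int) : List Int :=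
  L.map (fun j => span_at x j) ++ [PySem.List.pyGetD x 0 0]

-- the key most_compact effectively compares by
def K (x : List Int) : List Int :=
  kfull x (PySem.List.pyRange ((x.length : Int) - 1) 0 (-1))

-- B's span vector of the rotation starting at i, along the remaining levels ks
def svec (u : List Int) (n i : Int) (ks : List Int) : List Int :=
  ks.map (fun k => spanB u n i k)

-- B's full comparison key for start index i
def kI (u : List Int) (n i : Int) (ks : List Int) : List Int :=
  svec u n i ks ++ [PySem.List.pyGetD u i 0]

lemma most_compact_loop_eq (L : List Int) (a b : List Int) :
    most_compact_loop a b L = if kfull a L < kfull b L then a else b := by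
  induction L with
  | nil =>
    simp [most_compact_loop, kfull, List.cons_lt_cons_iff]
  | cons i rest ih =>
    have hk : ∀ x : List Int, kfull x (i :: rest) = span_at x i :: kfull x rest := by
      intro x; simp [kfull]
    simp only [most_compact_loop, hk, ih, span_at]
    rcases lt_trichotomy (PySem.Int.mod (PySem.List.pyGetD a i 0 - PySem.List.pyGetD a 0 0) 12)
      (PySem.Int.mod (PySem.List.pyGetD b i 0 - PySem.List.pyGetD b 0 0) 12) with h | h | h
    · rw [if_pos h, if_pos (List.cons_lt_cons_iff.mpr (Or.inl h))]
    · rw [if_neg (by rw [h]; exact lt_irrefl _), if_neg (by rw [h]; exact lt_irrefl _)]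
      by_cases h2 : kfull a rest < kfull b rest
      · rw [if_pos h2, if_pos (List.cons_lt_cons_iff.mpr (Or.inr ⟨h, h2⟩))]
      · rw [if_neg h2, if_neg (by
          intro hc
          rcases List.cons_lt_cons_iff.mp hc with h3 | ⟨_, h3⟩
          · exact absurd h3 (by rw [h]; exact lt_irrefl _)
          · exact h2 h3)]
    · rw [if_neg (not_lt_of_gt h), if_pos h, if_neg (by
        intro hc
        rcases List.cons_lt_cons_iff.mp hc with h3 | ⟨h3, _⟩
        · exact absurd h h3.asymm
        · exact absurd h3 (ne_of_gt h))]

lemma most_compact_eq (a b : List Int) (h : a.length = b.length) :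
    most_compact a b = if K a < K b then a else b := by
  unfold most_compact K
  rw [most_compact_loop_eq]
  simp [PySem.List.len_eq, h]

lemma rot_eq (u : List Int) (i : Int) (h : 0 ≤ i) :
    rotate_sequence u i = u.drop i.toNat ++ u.take i.toNat := by
  unfold rotate_sequence
  rw [PySem.List.slice_from u h, PySem.List.slice_to u h]

lemma rot_zero (u : List Int) : rotate_sequence u 0 = u := by
  rw [rot_eq u 0 le_rfl]; simp

lemma rot_length (u : List Int) (i : Int) (h : 0 ≤ i) :
    (rotate_sequence u i).length = u.length := by
  rw [rot_eq u i h]; simp; omega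

lemma rot_head (u : List Int) (i : Int) (h0 : 0 ≤ i) (h : i.toNat < u.length) :
    PySem.List.pyGetD (rotate_sequence u i) 0 0 = u[i.toNat] := by
  rw [rot_eq u i h0, PySem.List.pyGetD_ofNat']
  have hlen : 0 < (u.drop i.toNat).length := by simp; omega
  rw [List.getD_eq_getElem?_getD, List.getElem?_append_left hlen, List.getElem?_drop]
  have : i.toNat + 0 = i.toNat := by omega
  rw [this, List.getElem?_eq_getElem h]
  rfl

lemma K_inj (u : List Int) (hnd : u.Nodup) (i j : Int)
    (hi0 : 0 ≤ i) (hi : i.toNat < u.length) (hj0 : 0 ≤ j) (hj : j.toNat < u.length)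
    (hK : K (rotate_sequence u i) = K (rotate_sequence u j)) : i = j := by
  unfold K kfull at hK
  have hlen : (rotate_sequence u i).length = (rotate_sequence u j).length := by
    rw [rot_length u i hi0, rot_length u j hj0]
  rw [hlen] at hK
  have htail := List.append_inj_right hK (by simp)
  have hhead : PySem.List.pyGetD (rotate_sequence u i) 0 0
      = PySem.List.pyGetD (rotate_sequence u j) 0 0 := by
    simpa using htail
  rw [rot_head u i hi0 hi, rot_head u j hj0 hj] at hhead
  have := (List.Nodup.getElem_inj_iff hnd).mp hhead
  omega

-- a fold that always keeps one of its two arguments and never increases the key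
-- computes a member of minimal key (characterises A's comparator fold)
lemma fold_min (k : Int → List Int) (step : Int → Int → Int)
    (hstep : ∀ b i, (step b i = b ∨ step b i = i) ∧ k (step b i) ≤ k b ∧ k (step b i) ≤ k i)
    (L : List Int) (x0 : Int) :
    (L.foldl step x0) ∈ x0 :: L ∧ ∀ y ∈ x0 :: L, k (L.foldl step x0) ≤ k y := by
  induction L generalizing x0 with
  | nil => simp
  | cons i L ih =>
    rw [List.foldl_cons]
    obtain ⟨hmem, hmin⟩ := ih (step x0 i)
    obtain ⟨hor, hb, hi⟩ := hstep x0 i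
    constructor
    · rcases List.mem_cons.mp hmem with h | h
      · rw [h]
        rcases hor with h' | h' <;> rw [h'] <;> simp
      · simp [h]
    · intro y hy
      rcases List.mem_cons.mp hy with rfl | hy'
      · exact le_trans (hmin _ (List.mem_cons_self ..)) hb
      · rcases List.mem_cons.mp hy' with rfl | hy'
        · exact le_trans (hmin _ (List.mem_cons_self ..)) hi
        · exact hmin _ (List.mem_cons_of_mem _ hy')

lemma foldA_rot (u : List Int) (L : List Int) (hL : ∀ i ∈ L, 0 ≤ i) (j : Int) (hj : 0 ≤ j) :
    L.foldl (fun best i => most_compact best (rotate_sequence u i)) (rotate_sequence u j)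
    = rotate_sequence u (L.foldl
        (fun b i => if K (rotate_sequence u b) < K (rotate_sequence u i) then b else i) j) := by
  induction L generalizing j with
  | nil => simp
  | cons i L ih =>
    have h0i : 0 ≤ i := hL i (List.mem_cons_self ..)
    have hL' : ∀ x ∈ L, 0 ≤ x := fun x hx => hL x (List.mem_cons_of_mem _ hx)
    rw [List.foldl_cons, List.foldl_cons,
      most_compact_eq _ _ (by rw [rot_length u j hj, rot_length u i h0i])]
    by_cases h : K (rotate_sequence u j) < K (rotate_sequence u i)
    · simp only [h, if_pos]
      exact ih hL' j hj
    · simp only [h, if_false]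
      exact ih hL' i h0i

-- simplification of Source B's zip-comprehension filter stage
lemma stage_eq {α : Type} (cands : List α) (f : α → Int) (m : Int) :
    ((cands.zip (cands.map f)).filter (fun p => p.2 == m)).map Prod.fst
    = cands.filter (fun r => f r == m) := by
  rw [← List.map_prod_left_eq_zip, List.filter_map, List.map_map]
  simp [Function.comp_def]

lemma singleton_le_singleton {a b : Int} (h : a ≤ b) : ([a] : List Int) ≤ [b] := by
  rcases lt_or_eq_of_le h with h | h
  · exact le_of_lt (List.cons_lt_cons_iff.mpr (Or.inl h))
  · rw [h]

lemma append_last_le (x : List Int) {a b : Int} (h : a ≤ b) : x ++ [a] ≤ x ++ [b] := by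
  induction x with
  | nil => simpa using singleton_le_singleton h
  | cons c x ih => simpa using List.cons_le_cons c ih

lemma lt_append_of_lt (x y p q : List Int) (hlen : x.length = y.length) (h : x < y) :
    x ++ p < y ++ q := by
  induction x generalizing y with
  | nil =>
    have : y = [] := by
      cases y
      · rfl
      · simp at hlen
    rw [this] at h
    exact absurd h (lt_irrefl _)
  | cons c x ih =>
    cases y with
    | nil => simp at hlen
    | cons d y =>
      rcases List.cons_lt_cons_iff.mp h with h1 | ⟨h1, h2⟩
      · exact List.cons_lt_cons_iff.mpr (Or.inl h1)
      · exact List.cons_lt_cons_iff.mpr (Or.inr ⟨h1, ih y (by simpa using hlen) h2⟩)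

-- B's start-index span equals the rotation's span at the same level
lemma spanB_eq (u : List Int) (n i k : Int) (hn : n = (u.length : Int))
    (hi0 : 0 ≤ i) (hi : i < n) (hk0 : 0 ≤ k) (hk : k < n) :
    spanB u n i k = span_at (rotate_sequence u i) k := by
  subst hn
  have hN : (0 : Int) < (u.length : Int) := lt_of_le_of_lt hi0 hi
  have hhead : PySem.List.pyGetD u i 0 = PySem.List.pyGetD (rotate_sequence u i) 0 0 := by
    rw [rot_head u i hi0 (by omega), PySem.List.pyGetD_eq_getElem u 0 hi0 (by exact_mod_cast hi)]
  have hbody : PySem.List.pyGetD u (PySem.Int.mod (i + k) (u.length : Int)) 0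
      = PySem.List.pyGetD (rotate_sequence u i) k 0 := by
    rw [PySem.Int.mod_eq_emod_of_pos hN]
    have hrk : PySem.List.pyGetD (rotate_sequence u i) k 0
        = (u.drop i.toNat ++ u.take i.toNat)[k.toNat]'(by simp; omega) := by
      rw [PySem.List.pyGetD_eq_getElem _ 0 hk0 (by rw [rot_length u i hi0]; omega)]
      simp only [rot_eq u i hi0]
    rw [hrk]
    by_cases hc : i + k < (u.length : Int)
    · rw [Int.emod_eq_of_lt (by omega) hc,
        PySem.List.pyGetD_eq_getElem u 0 (by omega) (by omega)]
      rw [List.getElem_append_left (by simp; omega), List.getElem_drop]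
      congr 1
      omega
    · have : i + k = (i + k - (u.length : Int)) + 1 * (u.length : Int) := by ring
      rw [this, Int.add_mul_emod_self_right,
        Int.emod_eq_of_lt (by omega) (by omega),
        PySem.List.pyGetD_eq_getElem u 0 (by omega) (by omega)]
      rw [List.getElem_append_right (by simp; omega), List.getElem_take]
      congr 1
      simp
      omega
  unfold spanB span_at
  rw [hhead, hbody]

-- B's full key for a start index is A's key of the corresponding rotation
lemma K_eq_kI (u : List Int) (n i : Int) (hn : n = (u.length : Int))
    (hi0 : 0 ≤ i) (hi : i < n) :
    K (rotate_sequence u i) = kI u n i (PySem.List.pyRange (n - 1) 0 (-1)) := by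
  unfold K kI svec kfull
  have hrl : ((rotate_sequence u i).length : Int) = n := by
    rw [rot_length u i hi0, hn]
  rw [hrl]
  congr 1
  · refine List.map_congr_left ?_
    intro k hk
    obtain ⟨hk1, hk2⟩ := PySem.List.mem_pyRange_neg_one.mp hk
    exact (spanB_eq u n i k hn hi0 hi (by omega) (by omega)).symm
  · rw [rot_head u i hi0 (by omega), PySem.List.pyGetD_eq_getElem u 0 hi0 (by omega)]

lemma svec_cons (u : List Int) (n i k : Int) (ks : List Int) :
    svec u n i (k :: ks) = spanB u n i k :: svec u n i ks := by
  simp [svec]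

-- the elimination loop keeps a nonempty subset of the starts whose span vectors along
-- the remaining levels agree with each other and are strictly below every eliminated start
lemma elim_min (u : List Int) (n : Int) (ks : List Int) (starts : List Int)
    (hne : starts ≠ []) :
    elim_loop u n ks starts ≠ [] ∧ (∀ e ∈ elim_loop u n ks starts, e ∈ starts) ∧
    (∀ e ∈ elim_loop u n ks starts, ∀ s ∈ starts,
      (s ∈ elim_loop u n ks starts → svec u n e ks = svec u n s ks) ∧
      (s ∉ elim_loop u n ks starts → svec u n e ks < svec u n s ks)) := by
  induction ks generalizing starts with
  | nil =>
    refine ⟨hne, fun e he => he, ?_⟩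
    intro e _ s hs
    exact ⟨fun _ => rfl, fun hns => absurd hs hns⟩
  | cons k ks ih =>
    obtain ⟨m, hm⟩ := Option.ne_none_iff_exists'.mp
      (fun h => hne (by simpa using (PySem.List.min?_eq_none_iff
        (starts.map (fun i => spanB u n i k)) (fun x : Int => x)).mp h))
    have hmin : ∀ s ∈ starts, m ≤ spanB u n s k := by
      intro s hs
      exact PySem.List.min?_isMin hm _ (List.mem_map_of_mem hs)
    obtain ⟨r0, hr0, hr0m⟩ := List.mem_map.mp (PySem.List.min?_mem hm)
    have hres : elim_loop u n (k :: ks) starts =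
        (if (starts.filter (fun i => spanB u n i k == m)).length = 1
         then starts.filter (fun i => spanB u n i k == m)
         else elim_loop u n ks (starts.filter (fun i => spanB u n i k == m))) := by
      simp only [elim_loop, hm, Option.getD_some, stage_eq]
    set c' := starts.filter (fun i => spanB u n i k == m) with hc'
    have hr0c : r0 ∈ c' := List.mem_filter.mpr ⟨hr0, by simp [hr0m]⟩
    have hc'ne : c' ≠ [] := fun h => by rw [h] at hr0c; exact List.not_mem_nil hr0c
    have hmemc' : ∀ x ∈ c', x ∈ starts ∧ spanB u n x k = m := by
      intro x hx
      obtain ⟨h1, h2⟩ := List.mem_filter.mp hx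
      exact ⟨h1, by simpa using h2⟩
    have hnotc' : ∀ s ∈ starts, s ∉ c' → m < spanB u n s k := by
      intro s hs hsn
      refine lt_of_le_of_ne (hmin s hs) fun he => hsn (List.mem_filter.mpr ⟨hs, by simp [he.symm]⟩)
    rw [hres]
    by_cases hlen : c'.length = 1
    · rw [if_pos hlen]
      obtain ⟨e, he⟩ := List.length_eq_one_iff.mp hlen
      refine ⟨hc'ne, fun x hx => (hmemc' x hx).1, ?_⟩
      intro x hx s hs
      constructor
      · intro hsR
        rw [he] at hx hsR
        rcases List.mem_cons.mp hx with rfl | hx'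
        · rcases List.mem_cons.mp hsR with rfl | hs'
          · rfl
          · exact absurd hs' (List.not_mem_nil)
        · exact absurd hx' (List.not_mem_nil)
      · intro hsn
        have hstrict := hnotc' s hs hsn
        rw [svec_cons, svec_cons, (hmemc' x hx).2]
        exact List.cons_lt_cons_iff.mpr (Or.inl hstrict)
    · rw [if_neg hlen]
      obtain ⟨hne', hsub', hcmp'⟩ := ih c' hc'ne
      refine ⟨hne', fun x hx => (hmemc' x (hsub' x hx)).1, ?_⟩
      intro x hx s hs
      have hxc' : x ∈ c' := hsub' x hx
      have hxk : spanB u n x k = m := (hmemc' x hxc').2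
      constructor
      · intro hsR
        have hsc' : s ∈ c' := hsub' s hsR
        rw [svec_cons, svec_cons, hxk, (hmemc' s hsc').2,
          ((hcmp' x hx s hsc').1 hsR)]
      · intro hsn
        by_cases hsc' : s ∈ c'
        · have htail := (hcmp' x hx s hsc').2 hsn
          rw [svec_cons, svec_cons]
          exact List.cons_lt_cons_iff.mpr (Or.inr ⟨by rw [hxk, (hmemc' s hsc').2], htail⟩)
        · have hstrict := hnotc' s hs hsc'
          rw [svec_cons, svec_cons, hxk]
          exact List.cons_lt_cons_iff.mpr (Or.inl hstrict)

-- ===== VERDICT (by name: the statement is the Claim_ definition above) =====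
theorem normal_form_spec : Claim_equal_normal_form := by
  unfold Claim_equal_normal_form
  intro pcset _
  unfold Spec_normal_form normal_form normal_form_alt
  set u := PySem.List.sorted (PySem.Set.ofList pcset) (fun x => x) false with hu
  by_cases hnil : u = []
  · rw [hnil]
    simp [PySem.List.len_eq, PySem.List.pyRange_one_eq_nil (by norm_num : (0 : Int) ≤ 1)]
  · simp only [if_neg hnil]
    have hpw : u.Pairwise (· < ·) := hu ▸ PySem.List.sorted_ofList_pairwise_lt pcset
    have hnd : u.Nodup := hpw.imp (fun h => ne_of_lt h)
    have hn : 0 < u.length := List.length_pos_iff.mpr hnil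
    have hlen : PySem.List.len u = (u.length : Int) := PySem.List.len_eq u
    have hncast : (0 : Int) < PySem.List.len u := by rw [hlen]; exact_mod_cast hn
    have hrange0 : PySem.List.pyRange 0 (PySem.List.len u) 1
        = 0 :: PySem.List.pyRange 1 (PySem.List.len u) 1 := by
      rw [PySem.List.pyRange_one_cons hncast]; norm_num
    have hbound : ∀ i ∈ PySem.List.pyRange 0 (PySem.List.len u) 1, 0 ≤ i ∧ i.toNat < u.length := by
      intro i hi
      have := PySem.List.mem_pyRange_one.mp hi
      rw [hlen] at this
      omega
    have hL0 : ∀ i ∈ PySem.List.pyRange 1 (PySem.List.len u) 1, 0 ≤ i := by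
      intro i hi
      have := PySem.List.mem_pyRange_one.mp hi
      omega
    -- A's fold = rotation at the K-minimising index bA
    have hfa := foldA_rot u (PySem.List.pyRange 1 (PySem.List.len u) 1) hL0 0 le_rfl
    rw [rot_zero] at hfa
    rw [hfa]
    set bA := (PySem.List.pyRange 1 (PySem.List.len u) 1).foldl
      (fun b i => if K (rotate_sequence u b) < K (rotate_sequence u i) then b else i) 0 with hbA
    have hA := fold_min (fun x => K (rotate_sequence u x))
      (fun b i => if K (rotate_sequence u b) < K (rotate_sequence u i) then b else i) (by
      intro b i
      by_cases h : K (rotate_sequence u b) < K (rotate_sequence u i)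
      · refine ⟨Or.inl ?_, ?_, ?_⟩ <;> simp [h, le_of_lt h]
      · refine ⟨Or.inr ?_, ?_, ?_⟩ <;> simp [h, not_lt.mp h])
      (PySem.List.pyRange 1 (PySem.List.len u) 1) 0
    rw [← hbA, ← hrange0] at hA
    obtain ⟨hAmem, hAmin⟩ := hA
    obtain ⟨hA0, hAlt⟩ := hbound bA hAmem
    -- B's staged elimination over the start indices
    have hs0ne : PySem.List.pyRange 0 (PySem.List.len u) 1 ≠ [] := by
      rw [hrange0]; simp
    obtain ⟨hRne, hRsub, hRcmp⟩ := elim_min u (PySem.List.len u)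
      (PySem.List.pyRange (PySem.List.len u - 1) 0 (-1))
      (PySem.List.pyRange 0 (PySem.List.len u) 1) hs0ne
    set R := elim_loop u (PySem.List.len u) (PySem.List.pyRange (PySem.List.len u - 1) 0 (-1))
      (PySem.List.pyRange 0 (PySem.List.len u) 1) with hR
    obtain ⟨b0, hb0⟩ := Option.ne_none_iff_exists'.mp
      (fun h => hRne ((PySem.List.min?_eq_none_iff R
        (fun i => PySem.List.pyGetD u i 0)).mp h))
    have hb0R : b0 ∈ R := PySem.List.min?_mem hb0
    have hb0s : b0 ∈ PySem.List.pyRange 0 (PySem.List.len u) 1 := hRsub b0 hb0R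
    obtain ⟨hb00, hb0lt⟩ := hbound b0 hb0s
    have hgoal : PySem.List.slice u
          (some ((PySem.List.min? R (fun i => PySem.List.pyGetD u i 0)).getD 0)) none
        ++ PySem.List.slice u none
          (some ((PySem.List.min? R (fun i => PySem.List.pyGetD u i 0)).getD 0))
        = rotate_sequence u b0 := by
      rw [hb0]; rfl
    rw [hgoal]
    -- K-minimality of b0 over all starts
    have hib : ∀ i, i ∈ PySem.List.pyRange 0 (PySem.List.len u) 1 → i < PySem.List.len u := by
      intro i hi
      exact (PySem.List.mem_pyRange_one.mp hi).2
    have hBmin : ∀ s ∈ PySem.List.pyRange 0 (PySem.List.len u) 1,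
        K (rotate_sequence u b0) ≤ K (rotate_sequence u s) := by
      intro s hs
      obtain ⟨hs0, hslt⟩ := hbound s hs
      rw [K_eq_kI u (PySem.List.len u) b0 hlen hb00 (hib b0 hb0s),
        K_eq_kI u (PySem.List.len u) s hlen hs0 (hib s hs)]
      unfold kI
      by_cases hsR : s ∈ R
      · rw [(hRcmp b0 hb0R s hs).1 hsR]
        exact append_last_le _ (PySem.List.min?_isMin hb0 s hsR)
      · have hstrict := (hRcmp b0 hb0R s hs).2 hsR
        exact le_of_lt (lt_append_of_lt _ _ _ _ (by simp [svec]) hstrict)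
    have h1 : K (rotate_sequence u bA) ≤ K (rotate_sequence u b0) := hAmin b0 hb0s
    have h2 : K (rotate_sequence u b0) ≤ K (rotate_sequence u bA) := hBmin bA hAmem
    have hK := le_antisymm h1 h2
    rw [K_inj u hnd bA b0 hA0 hAlt hb00 hb0lt hK]
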